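-- pv_equiv track=rewrite | github.com/RameezAkther/5g_roc_backend | services/analyst_context.py | _infer_scope_from_query
-- ===== SOURCE A (Python) =====
-- from typing import Dict, List, Optional, Tuple
--
-- def _infer_scope_from_query(
--     user_query: Optional[str],
--     topology: Dict[str, List[str]]
-- ) -> Tuple[Optional[str], Optional[str]]:
--     """
--     Try to infer (city, cell_id) from the user's natural language question.
--     If we find a cell, we also fix the city to the one that owns that cell.
--     Returns (city or None, cell_id or None).
--     """
--     if not user_query:
--         return None, None
--
--     q = user_query.lower()
--
--     # 1) Try to detect city by name
--     detected_city: Optional[str] = None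
--     for city in topology.keys():
--         if city.lower() in q:
--             detected_city = city
--             break
--
--     # 2) Try to detect a specific cell ID by exact substring (case-insensitive)
--     detected_cell: Optional[str] = None
--     for city, cells in topology.items():
--         for cid in cells:
--             if cid.lower() in q:
--                 detected_cell = cid
--                 detected_city = city  # force-align city if cell is found
--                 break
--         if detected_cell:
--             break
--
--     return detected_city, detected_cell
-- ===== SOURCE B (Python) =====
-- from typing import Dict, List, Optional, Tuple
--
-- def _infer_scope_from_query(
--     user_query: Optional[str],
--     topology: Dict[str, List[str]]
-- ) -> Tuple[Optional[str], Optional[str]]: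
--     # Single pass over the topology: return at the first matching cell
--     # (its city wins), otherwise remember the first matching city name.
--     if not user_query:
--         return None, None
--     q = user_query.lower()
--     city_hit: Optional[str] = None
--     for city, cells in topology.items():
--         if city_hit is None and city.lower() in q:
--             city_hit = city
--         m = next((c for c in cells if c.lower() in q), None)
--         if m is not None:
--             return city, m
--     return city_hit, None
-- ===== Notes on version B (the rewrite author's own statement) =====
-- stated objective: simpler
-- what changed: A makes two separate passes over the topology (one for the city name, one with break/override state for the cell id); B is a single pass that returns at the first matching cell and otherwise remembers the first matching city.
-- outside the precondition, e.g. on _infer_scope_from_query('x', {'A': [''], 'B': ['x']}): A returns ('B', 'x'), B returns ('A', '')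
import Mathlib
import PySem

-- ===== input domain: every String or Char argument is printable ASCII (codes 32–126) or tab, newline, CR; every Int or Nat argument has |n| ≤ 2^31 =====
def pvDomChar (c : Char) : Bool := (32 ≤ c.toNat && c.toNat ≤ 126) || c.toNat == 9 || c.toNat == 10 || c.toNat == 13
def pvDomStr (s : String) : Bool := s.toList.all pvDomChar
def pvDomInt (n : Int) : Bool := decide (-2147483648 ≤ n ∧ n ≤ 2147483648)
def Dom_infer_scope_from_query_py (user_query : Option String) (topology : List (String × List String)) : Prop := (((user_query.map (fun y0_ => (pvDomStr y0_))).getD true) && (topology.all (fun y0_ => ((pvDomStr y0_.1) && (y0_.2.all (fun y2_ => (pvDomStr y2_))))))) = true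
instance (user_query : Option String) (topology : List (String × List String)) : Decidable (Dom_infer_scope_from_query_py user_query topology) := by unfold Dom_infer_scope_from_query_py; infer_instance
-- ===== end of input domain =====

-- B replaces A's two passes over the topology by a single pass with early return (simpler);
-- Pre_ excludes topologies containing an empty cell id, where '' is a substring of every
-- query and A's truthiness-based break gives an accidental result.


-- ===== PORT A =====
-- 'p.lower() in q'
def pvMatch (p q : String) : Bool := PySem.Str.isIn (PySem.Str.lower p) q

-- pass 1: first city whose lowercased name occurs in q
def pvCityLoopA (q : String) : List (String × List String) → Option String
  | [] => none
  | (city, _) :: rest => if pvMatch city q then some city else pvCityLoopA q rest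

-- 'if detected_cell:' — truthiness of an Optional[str]
def pvTruthy : Option String → Bool
  | none => false
  | some s => !(s == "")

-- pass 2: break at first cell, override city; outer break only if detected_cell is truthy
def pvCellLoopA (q : String) : List (String × List String) → Option String × Option String → Option String × Option String
  | [], st => st
  | (city, cells) :: rest, st =>
    let st' := match cells.find? (fun c => pvMatch c q) with
      | some cid => (some city, some cid)
      | none => st
    if pvTruthy st'.2 then st' else pvCellLoopA q rest st'

def infer_scope_from_query_py (user_query : Option String) (topology : List (String × List String)) : Option String × Option String :=
  match user_query with
  | none => (none, none)
  | some s =>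
    if s == "" then (none, none)
    else
      let q := PySem.Str.lower s
      let detected_city := pvCityLoopA q topology
      pvCellLoopA q topology (detected_city, none)

-- ===== PORT B =====
-- single pass: early return at first matching cell, else remember first matching city
def pvLoopB (q : String) : List (String × List String) → Option String → Option String × Option String
  | [], cityHit => (cityHit, none)
  | (city, cells) :: rest, cityHit =>
    let cityHit' := if cityHit.isNone && pvMatch city q then some city else cityHit
    match cells.find? (fun c => pvMatch c q) with
    | some m => (some city, some m)
    | none => pvLoopB q rest cityHit'

def infer_scope_from_query_py_alt (user_query : Option String) (topology : List (String × List String)) : Option String × Option String :=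
  match user_query with
  | none => (none, none)
  | some s =>
    if s == "" then (none, none)
    else pvLoopB (PySem.Str.lower s) topology none

-- ===== PRECONDITION & SPEC =====
-- Pre_ excludes only non-empty queries paired with a topology containing an empty cell id:
-- there '' is a substring of every query and A's 'if detected_cell:' truthiness check makes
-- the winning (city, cell) pair an accident of A's break logic; on falsy queries both
-- programs return (None, None) whatever the topology, so those stay inside Pre_.
def Pre_infer_scope_from_query_py (user_query : Option String) (topology : List (String × List String)) : Prop :=
  ((match user_query with
    | none => true
    | some s => (s == "") || topology.all (fun p => p.2.all (fun c => !(c == "")))) : Bool) = true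
instance (user_query : Option String) (topology : List (String × List String)) : Decidable (Pre_infer_scope_from_query_py user_query topology) := by unfold Pre_infer_scope_from_query_py; infer_instance

def pvWitness_infer_scope_from_query_py : Option String × (List (String × List String)) :=
  (some "status of c1 in paris", [("Paris", ["C1", "C2"]), ("Lyon", ["L9"])])

def Spec_infer_scope_from_query_py (user_query : Option String) (topology : List (String × List String)) (out : Option String × Option String) : Prop := out = infer_scope_from_query_py_alt user_query topology
instance (user_query : Option String) (topology : List (String × List String)) (out : Option String × Option String) : Decidable (Spec_infer_scope_from_query_py user_query topology out) := by unfold Spec_infer_scope_from_query_py; infer_instance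

-- ===== CLAIM (what is proved, stated in full; the proofs are below) =====
def Claim_equal_infer_scope_from_query_py : Prop := ∀ (user_query : Option String) (topology : List (String × List String)), Dom_infer_scope_from_query_py user_query topology → Pre_infer_scope_from_query_py user_query topology → Spec_infer_scope_from_query_py user_query topology (infer_scope_from_query_py user_query topology)

-- ===== LEMMAS AND PROOFS =====

-- first (city, cell) pair, in topology order, whose cell matches q
def pvFirstHit (q : String) : List (String × List String) → Option (String × String)
  | [] => none
  | (city, cells) :: rest =>
    match cells.find? (fun c => pvMatch c q) with
    | some cid => some (city, cid)
    | none => pvFirstHit q rest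

lemma pvCellLoopA_char (q : String) (topo : List (String × List String))
    (hPre : ∀ p ∈ topo, ∀ c ∈ p.2, c ≠ "") (dc : Option String) :
    pvCellLoopA q topo (dc, none) =
      match pvFirstHit q topo with
      | some p => (some p.1, some p.2)
      | none => (dc, none) := by
  induction topo generalizing dc with
  | nil => rfl
  | cons hd tl ih =>
    obtain ⟨city, cells⟩ := hd
    simp only [pvCellLoopA, pvFirstHit]
    cases hfind : cells.find? (fun c => pvMatch c q) with
    | some cid =>
      have hc : cid ≠ "" := hPre _ (List.mem_cons_self) _ (List.mem_of_find?_eq_some hfind)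
      simp [pvTruthy, hc]
    | none =>
      simp only [pvTruthy]
      exact ih (fun p hp c hc => hPre p (List.mem_cons_of_mem _ hp) c hc) dc

-- threading of city_hit in B's single pass, in isolation
def pvCityB (q : String) : List (String × List String) → Option String → Option String
  | [], ch => ch
  | (city, _) :: rest, ch => pvCityB q rest (if ch.isNone && pvMatch city q then some city else ch)

lemma pvLoopB_char (q : String) (topo : List (String × List String)) (ch : Option String) :
    pvLoopB q topo ch =
      match pvFirstHit q topo with
      | some p => (some p.1, some p.2)
      | none => (pvCityB q topo ch, none) := by
  induction topo generalizing ch with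
  | nil => rfl
  | cons hd tl ih =>
    obtain ⟨city, cells⟩ := hd
    simp only [pvLoopB, pvFirstHit, pvCityB]
    cases hfind : cells.find? (fun c => pvMatch c q) with
    | some cid => simp
    | none => exact ih _

lemma pvCityB_some (q : String) (topo : List (String × List String)) (c : String) :
    pvCityB q topo (some c) = some c := by
  induction topo with
  | nil => rfl
  | cons hd tl ih => obtain ⟨city, cells⟩ := hd; simpa [pvCityB] using ih

lemma pvCityB_none (q : String) (topo : List (String × List String)) :
    pvCityB q topo none = pvCityLoopA q topo := by
  induction topo with
  | nil => rfl
  | cons hd tl ih =>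
    obtain ⟨city, cells⟩ := hd
    simp only [pvCityB, pvCityLoopA, Option.isNone_none, Bool.true_and]
    by_cases h : pvMatch city q = true
    · simp [h, pvCityB_some]
    · simp [h, ih]

-- ===== VERDICT (by name: the statement is the Claim_ definition above) =====
theorem infer_scope_from_query_py_spec : Claim_equal_infer_scope_from_query_py := by
  intro uq topo _hDom hPre
  unfold Spec_infer_scope_from_query_py infer_scope_from_query_py infer_scope_from_query_py_alt
  cases uq with
  | none => rfl
  | some s =>
    by_cases hs : s == ""
    · simp [hs]
    · simp only [hs, if_false]
      have hPre' : ∀ p ∈ topo, ∀ c ∈ p.2, c ≠ "" := by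
        intro p hp c hc
        unfold Pre_infer_scope_from_query_py at hPre
        simp only [hs, Bool.false_or, List.all_eq_true] at hPre
        have h2 := hPre p hp c hc
        simpa using h2
      rw [pvCellLoopA_char _ _ hPre', pvLoopB_char]
      cases pvFirstHit (PySem.Str.lower s) topo with
      | some p => rfl
      | none => simp [pvCityB_none]
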